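-- pv_equiv track=rewrite | github.com/sushraju/leetcode | max_moolah.py | calc_max_pay
-- ===== SOURCE A (Python) =====
-- def calc_max_pay(start_time, end_time, d_starts, d_ends, d_pays):
--     curr_max_pay = 0
--     max_pay = 0
--     for i in range(0, len(d_starts)):
--         curr_max_pay += d_pays[i]
--         for k in range(0, len(d_starts)):
--             if i != k:
--                 if d_starts[k] > d_starts[i] and d_starts[k] >= d_ends[i] and d_ends[k] <= end_time and d_starts[k] >= start_time:
--                     curr_max_pay += d_pays[k]
--
--         if curr_max_pay > max_pay:
--             max_pay = curr_max_pay
--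
--         curr_max_pay = 0
--
--     return max_pay
-- ===== SOURCE B (Python) =====
-- from bisect import bisect_left
--
-- def calc_max_pay(start_time, end_time, d_starts, d_ends, d_pays):
--     jobs = list(zip(d_starts, d_ends, d_pays))
--     eligible = sorted([(s, p) for s, e, p in jobs if start_time <= s and e <= end_time],
--                       key=lambda sp: sp[0])
--     starts = [sp[0] for sp in eligible]
--     suffix = [0] * (len(eligible) + 1)
--     for j in range(len(eligible) - 1, -1, -1):
--         suffix[j] = suffix[j + 1] + eligible[j][1]
--     best = 0
--     for s, e, p in jobs:
--         cand = p + suffix[bisect_left(starts, max(s + 1, e))]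
--         if cand > best:
--             best = cand
--     return best
-- ===== Notes on version B (the rewrite author's own statement) =====
-- stated objective: faster
-- what changed: Replaces the quadratic all-pairs inner scan by: filter eligible jobs once, sort them by start, precompute suffix pay sums, and answer each job's 'later-starting eligible pay' query with one bisect_left lookup.
-- outside the precondition, e.g. on calc_max_pay(0, 10, [5, 5], [], [1, 2]): A returns 2, B returns 0
import Mathlib
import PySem

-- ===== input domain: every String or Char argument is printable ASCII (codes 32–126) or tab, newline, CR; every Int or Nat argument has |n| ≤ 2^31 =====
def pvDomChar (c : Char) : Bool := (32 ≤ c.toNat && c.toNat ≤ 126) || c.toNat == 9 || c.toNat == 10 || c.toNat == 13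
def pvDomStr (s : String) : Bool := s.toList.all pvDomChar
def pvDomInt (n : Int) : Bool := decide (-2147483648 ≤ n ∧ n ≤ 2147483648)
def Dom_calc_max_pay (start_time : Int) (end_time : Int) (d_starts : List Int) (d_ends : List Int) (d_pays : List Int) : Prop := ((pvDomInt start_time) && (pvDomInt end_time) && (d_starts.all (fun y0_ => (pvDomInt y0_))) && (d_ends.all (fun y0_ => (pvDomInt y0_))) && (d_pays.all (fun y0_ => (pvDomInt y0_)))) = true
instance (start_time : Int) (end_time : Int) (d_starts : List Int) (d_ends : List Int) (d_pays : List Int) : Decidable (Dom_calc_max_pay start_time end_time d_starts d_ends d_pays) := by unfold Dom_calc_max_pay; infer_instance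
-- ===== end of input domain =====

-- B replaces A's quadratic all-pairs inner scan by filter-eligible + sort by start +
-- suffix pay sums + one bisect_left lookup per job (objective: faster).

-- ===== PORT A =====
def calc_max_pay (start_time : Int) (end_time : Int) (d_starts : List Int) (d_ends : List Int) (d_pays : List Int) : Int :=
  (PySem.List.pyRange 0 (PySem.List.len d_starts) 1).foldl (fun max_pay i =>
    let curr_max_pay :=
      (PySem.List.pyRange 0 (PySem.List.len d_starts) 1).foldl (fun curr_max_pay k =>
        if i ≠ k then
          if PySem.List.pyGetD d_starts k 0 > PySem.List.pyGetD d_starts i 0 ∧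
             PySem.List.pyGetD d_starts k 0 ≥ PySem.List.pyGetD d_ends i 0 ∧
             PySem.List.pyGetD d_ends k 0 ≤ end_time ∧
             PySem.List.pyGetD d_starts k 0 ≥ start_time then
            curr_max_pay + PySem.List.pyGetD d_pays k 0
          else curr_max_pay
        else curr_max_pay) (PySem.List.pyGetD d_pays i 0)
    if curr_max_pay > max_pay then curr_max_pay else max_pay) 0

-- ===== PORT B =====
-- suffixSums ports Source B's backward loop filling suffix[j] = suffix[j+1] + eligible[j][1]
-- (structural backward accumulation, exact for that loop).
def suffixSums : List (Int × Int) → List Int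
  | [] => [0]
  | (_, p) :: t => (p + (suffixSums t).headD 0) :: suffixSums t

def calc_max_pay_alt (start_time : Int) (end_time : Int) (d_starts : List Int) (d_ends : List Int) (d_pays : List Int) : Int :=
  let jobs := d_starts.zip (d_ends.zip d_pays)
  let eligible := PySem.List.sorted
    ((jobs.filter (fun y => decide (start_time ≤ y.1 ∧ y.2.1 ≤ end_time))).map (fun y => (y.1, y.2.2)))
    (fun sp => sp.1) false
  let starts := eligible.map (fun sp => sp.1)
  let suffix := suffixSums eligible
  jobs.foldl (fun best y =>
    let cand := y.2.2 + suffix.getD (PySem.List.bisectLeft starts (max (y.1 + 1) y.2.1)) 0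
    if cand > best then cand else best) 0

-- ===== PRECONDITION & SPEC =====
-- Pre_ excludes inputs where d_ends or d_pays is shorter than d_starts: there A raises
-- IndexError, or (when its short-circuited comparisons never reach the missing entry)
-- returns a value that is an artefact of which out-of-range accesses happen to be skipped.
def Pre_calc_max_pay (start_time : Int) (end_time : Int) (d_starts : List Int) (d_ends : List Int) (d_pays : List Int) : Prop :=
  d_starts.length ≤ d_ends.length ∧ d_starts.length ≤ d_pays.length
instance (start_time : Int) (end_time : Int) (d_starts : List Int) (d_ends : List Int) (d_pays : List Int) : Decidable (Pre_calc_max_pay start_time end_time d_starts d_ends d_pays) := by unfold Pre_calc_max_pay; infer_instance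
def pvWitness_calc_max_pay : Int × Int × List Int × List Int × List Int := (0, 10, [1, 3], [2, 4], [5, 6])

def Spec_calc_max_pay (start_time : Int) (end_time : Int) (d_starts : List Int) (d_ends : List Int) (d_pays : List Int) (out : Int) : Prop := out = calc_max_pay_alt start_time end_time d_starts d_ends d_pays
instance (start_time : Int) (end_time : Int) (d_starts : List Int) (d_ends : List Int) (d_pays : List Int) (out : Int) : Decidable (Spec_calc_max_pay start_time end_time d_starts d_ends d_pays out) := by unfold Spec_calc_max_pay; infer_instance

-- ===== CLAIM (what is proved, stated in full; the proofs are below) =====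
def Claim_equal_calc_max_pay : Prop := ∀ (start_time : Int) (end_time : Int) (d_starts : List Int) (d_ends : List Int) (d_pays : List Int), Dom_calc_max_pay start_time end_time d_starts d_ends d_pays → Pre_calc_max_pay start_time end_time d_starts d_ends d_pays → Spec_calc_max_pay start_time end_time d_starts d_ends d_pays (calc_max_pay start_time end_time d_starts d_ends d_pays)

-- ===== LEMMAS AND PROOFS =====

-- Total pay of the jobs qualifying relative to a base job with start s and end e.
def payFilterSum (start_time end_time : Int) (jobs : List (Int × Int × Int)) (s e : Int) : Int :=
  ((jobs.filter (fun y => decide (y.1 > s ∧ y.1 ≥ e ∧ y.2.1 ≤ end_time ∧ y.1 ≥ start_time))).map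
    (fun y => y.2.2)).sum

-- A fold over range(len ds) reading the three lists at the index is a fold over their zip.
theorem zip_fold {β : Type} (g : Int → Int → Int → β → β) :
    ∀ (ds de dp : List Int) (init : β), ds.length ≤ de.length → ds.length ≤ dp.length →
    (List.range ds.length).foldl (fun a k => g (ds.getD k 0) (de.getD k 0) (dp.getD k 0) a) init
      = (ds.zip (de.zip dp)).foldl (fun a y => g y.1 y.2.1 y.2.2 a) init := by
  intro ds
  induction ds with
  | nil => intro de dp init _ _; simp
  | cons s ds ih =>
    intro de dp init h1 h2
    match de, dp with
    | [], _ => simp at h1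
    | _, [] => simp at h2
    | e :: de, p :: dp =>
      simp only [List.length_cons, List.range_succ_eq_map, List.foldl_cons, List.foldl_map,
        List.getD_cons_zero, List.zip_cons_cons]
      simp only [Nat.succ_eq_add_one, List.getD_cons_succ]
      exact ih de dp (g s e p init) (by simpa using h1) (by simpa using h2)

theorem sum_map_ite {α : Type} (P : α → Prop) [DecidablePred P] (g : α → Int) :
    ∀ (l : List α),
    (l.map (fun y => if P y then g y else 0)).sum = ((l.filter (fun y => decide (P y))).map g).sum := by
  intro l
  induction l with
  | nil => simp
  | cons x l ih =>
    by_cases h : P x <;> simp [h, ih]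

theorem fold_if_add {α : Type} (P : α → Prop) [DecidablePred P] (g : α → Int)
    (l : List α) (init : Int) :
    l.foldl (fun c x => if P x then c + g x else c) init
      = init + ((l.filter (fun y => decide (P y))).map g).sum := by
  rw [← sum_map_ite]
  rw [show (fun (c : Int) x => if P x then c + g x else c)
        = (fun (c : Int) x => c + (if P x then g x else 0)) by
      funext c x; split <;> simp]
  exact PySem.List.foldl_add l _ init

theorem suffixSums_getD : ∀ (l : List (Int × Int)) (j : Nat),
    (suffixSums l).getD j 0 = ((l.drop j).map (fun sp => sp.2)).sum := by
  intro l
  induction l with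
  | nil => intro j; cases j <;> simp [suffixSums]
  | cons x l ih =>
    intro j
    cases j with
    | zero =>
      have h0 := ih 0
      simp only [List.drop_zero] at h0
      simp only [suffixSums, List.getD_cons_zero, List.headD_eq_head?_getD]
      cases hsl : suffixSums l <;> simp_all
    | succ j => simpa [suffixSums] using ih j

theorem filter_eq_drop {α : Type} (p : α → Bool) :
    ∀ (l : List α) (r : Nat), r ≤ l.length →
    (∀ (j : Nat) (hj : j < l.length), j < r → p l[j] = false) →
    (∀ (j : Nat) (hj : j < l.length), r ≤ j → p l[j] = true) →
    l.filter p = l.drop r := by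
  intro l
  induction l with
  | nil => intro r hr _ _; simp_all
  | cons x l ih =>
    intro r hr hlt hge
    cases r with
    | zero =>
      have : ∀ y ∈ x :: l, p y = true := by
        intro y hy
        obtain ⟨j, hj, rfl⟩ := List.getElem_of_mem hy
        exact hge j hj (Nat.zero_le _)
      simp [List.filter_eq_self.mpr this]
    | succ r =>
      have hx : p x = false := hlt 0 (by simp) (Nat.succ_pos _)
      simp only [List.filter_cons, hx, Bool.false_eq_true, List.drop_succ_cons]
      · exact ih r (by simpa using hr)
          (fun j hj hlt' => hlt (j+1) (by simpa using hj) (by omega))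
          (fun j hj hge' => hge (j+1) (by simpa using hj) (by omega))

-- A's value, characterised as a single fold over the zipped job list.
theorem calc_max_pay_char (start_time end_time : Int) (ds de dp : List Int)
    (h1 : ds.length ≤ de.length) (h2 : ds.length ≤ dp.length) :
    calc_max_pay start_time end_time ds de dp
      = (ds.zip (de.zip dp)).foldl (fun mp y =>
          let cand := y.2.2 + payFilterSum start_time end_time (ds.zip (de.zip dp)) y.1 y.2.1
          if cand > mp then cand else mp) 0 := by
  unfold calc_max_pay
  simp only [PySem.List.len_eq, PySem.List.pyRange_zero_nat, List.foldl_map,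
    PySem.List.pyGetD_natCast]
  have hinner : ∀ i : Nat,
      List.foldl (fun (c : Int) (k : Nat) =>
          if (i : Int) ≠ (k : Int) then
            if ds.getD k 0 > ds.getD i 0 ∧ ds.getD k 0 ≥ de.getD i 0 ∧
               de.getD k 0 ≤ end_time ∧ ds.getD k 0 ≥ start_time then
              c + dp.getD k 0
            else c
          else c) (dp.getD i 0) (List.range ds.length)
        = dp.getD i 0 +
            payFilterSum start_time end_time (ds.zip (de.zip dp)) (ds.getD i 0) (de.getD i 0) := by
    intro i
    have hnog := PySem.List.foldl_congr_mem (List.range ds.length)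
        (fun (c : Int) (k : Nat) =>
          if (i : Int) ≠ (k : Int) then
            if ds.getD k 0 > ds.getD i 0 ∧ ds.getD k 0 ≥ de.getD i 0 ∧
               de.getD k 0 ≤ end_time ∧ ds.getD k 0 ≥ start_time then
              c + dp.getD k 0
            else c
          else c)
        (fun (c : Int) (k : Nat) =>
          if ds.getD k 0 > ds.getD i 0 ∧ ds.getD k 0 ≥ de.getD i 0 ∧
             de.getD k 0 ≤ end_time ∧ ds.getD k 0 ≥ start_time then
            c + dp.getD k 0
          else c) (dp.getD i 0) ?_
    · rw [hnog]
      rw [zip_fold (fun s' e' p' c =>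
            if s' > ds.getD i 0 ∧ s' ≥ de.getD i 0 ∧ e' ≤ end_time ∧ s' ≥ start_time then
              c + p' else c) ds de dp (dp.getD i 0) h1 h2]
      exact fold_if_add (fun y : Int × Int × Int => y.1 > ds.getD i 0 ∧ y.1 ≥ de.getD i 0 ∧ y.2.1 ≤ end_time ∧ y.1 ≥ start_time) (fun y => y.2.2) _ _
    · intro c k _
      by_cases h : (i : Int) = (k : Int)
      · have hik : i = k := by exact_mod_cast h
        subst hik
        simp
      · simp [h]
  simp only [hinner]
  exact zip_fold (fun s' e' p' mp =>
      if p' + payFilterSum start_time end_time (ds.zip (de.zip dp)) s' e' > mp then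
        p' + payFilterSum start_time end_time (ds.zip (de.zip dp)) s' e'
      else mp) ds de dp 0 h1 h2

theorem alt_char (start_time end_time : Int) (jobs : List (Int × Int × Int)) (y : Int × Int × Int) :
    (y.2.2 + (suffixSums (PySem.List.sorted
        ((jobs.filter (fun z => decide (start_time ≤ z.1 ∧ z.2.1 ≤ end_time))).map (fun z => (z.1, z.2.2)))
        (fun sp => sp.1) false)).getD
        (PySem.List.bisectLeft ((PySem.List.sorted
        ((jobs.filter (fun z => decide (start_time ≤ z.1 ∧ z.2.1 ≤ end_time))).map (fun z => (z.1, z.2.2)))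
        (fun sp => sp.1) false).map (fun sp => sp.1)) (max (y.1 + 1) y.2.1)) 0)
      = y.2.2 + payFilterSum start_time end_time jobs y.1 y.2.1 := by
  set pre := (jobs.filter (fun z => decide (start_time ≤ z.1 ∧ z.2.1 ≤ end_time))).map
      (fun z => (z.1, z.2.2)) with hpre
  set E := PySem.List.sorted pre (fun sp => sp.1) false with hE
  set t := max (y.1 + 1) y.2.1 with ht
  set r := PySem.List.bisectLeft (E.map (fun sp => sp.1)) t with hr
  congr 1
  obtain ⟨hrle, hlt, hge⟩ :=
    PySem.List.bisectLeft_spec (E.map (fun sp => sp.1)) t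
      (PySem.List.sorted_map_key_pairwise pre (fun sp => sp.1))
  have hfd : E.filter (fun sp => decide (t ≤ sp.1)) = E.drop r := by
    refine filter_eq_drop _ E r (by simpa using hrle) (fun j hj hjr => ?_) (fun j hj hjr => ?_)
    · have := hlt j (by simpa using hj) hjr
      simp only [List.getElem_map] at this
      simp [this, not_le]
    · have := hge j (by simpa using hj) hjr
      simp only [List.getElem_map] at this
      simpa using this
  rw [suffixSums_getD, ← hfd]
  have hperm : ((E.filter (fun sp => decide (t ≤ sp.1))).map (fun sp => sp.2)).sum
      = ((pre.filter (fun sp => decide (t ≤ sp.1))).map (fun sp => sp.2)).sum :=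
    (((PySem.List.sorted_perm pre (fun sp => sp.1) false).filter _).map _).sum_eq
  rw [hperm, hpre]
  rw [List.filter_map, List.map_map, List.filter_filter]
  unfold payFilterSum
  simp only [Function.comp_def]
  refine congrArg List.sum (congrArg (List.map _) (List.filter_congr (fun z _ => ?_)))
  rw [show ∀ a b : Prop, ∀ [Decidable a] [Decidable b], (decide a && decide b) = decide (a ∧ b) by
        intro a b _ _; simp]
  rw [decide_eq_decide, max_le_iff]
  omega

theorem calc_max_pay_spec : Claim_equal_calc_max_pay := by
  intro st et ds de dp _hdom hpre
  unfold Spec_calc_max_pay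
  rw [calc_max_pay_char st et ds de dp hpre.1 hpre.2]
  unfold calc_max_pay_alt
  refine PySem.List.foldl_congr_mem _ _ _ _ (fun mp y _ => ?_)
  dsimp only
  rw [alt_char st et (ds.zip (de.zip dp)) y]
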